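-- pv_equiv track=rewrite | github.com/nsu-ai/DerivBaseRu | src/functions.py | onlypfx
-- ===== SOURCE A (Python) =====
-- from typing import List, Set, Tuple, Dict
--
-- def onlypfx(word: str, args: Set[str], mode='do'):
--     pfx_b_ = args
--     possible_results = list()
--
--     for pfx_b in pfx_b_:
--         if mode == 'do':
--             if word[:len(pfx_b)] == pfx_b:
--                 possible_results.append(word)
--         else:
--             possible_results.append(word)
--
--     return possible_results
-- ===== SOURCE B (Python) =====
-- def onlypfx(word: str, args, mode='do'):
--     if mode != 'do':
--         return [word] * len(args)
--     # Walk the word once, building each of its prefixes, and count how many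
--     # are members of the set args (args has distinct elements).
--     hits = '' in args
--     p = ''
--     for ch in word:
--         p += ch
--         hits += p in args
--     return [word] * hits
-- ===== Notes on version B (the rewrite author's own statement) =====
-- stated objective: alternative
-- what changed: B inverts the traversal: instead of scanning the set args and testing each element against word, it walks word once, builds each prefix incrementally, counts which prefixes are members of the set, and replicates word once; Pre_ only states the set-representation invariant (distinct list elements), which every Set[str] argument satisfies.
import Mathlib
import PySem

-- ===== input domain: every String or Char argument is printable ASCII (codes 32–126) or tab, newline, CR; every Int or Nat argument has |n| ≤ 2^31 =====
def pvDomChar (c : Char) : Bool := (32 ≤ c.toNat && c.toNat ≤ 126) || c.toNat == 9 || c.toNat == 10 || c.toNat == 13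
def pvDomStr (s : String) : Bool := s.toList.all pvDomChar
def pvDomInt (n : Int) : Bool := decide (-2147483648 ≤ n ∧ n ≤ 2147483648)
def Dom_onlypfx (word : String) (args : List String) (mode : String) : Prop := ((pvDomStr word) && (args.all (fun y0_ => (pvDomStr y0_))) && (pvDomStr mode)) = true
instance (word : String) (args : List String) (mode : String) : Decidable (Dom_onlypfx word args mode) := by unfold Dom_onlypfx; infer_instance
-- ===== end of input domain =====

-- B inverts the traversal: instead of scanning the set args and testing each element against
-- word, it walks word once, builds each prefix incrementally and counts which prefixes are
-- members of the set args, then replicates word; objective: alternative.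
-- ===== PORT A =====
def onlypfx (word : String) (args : List String) (mode : String) : List String :=
  args.foldl (fun possible_results pfx_b =>
    if mode == "do" then
      if PySem.Str.slice word none (some (PySem.Str.len pfx_b)) == pfx_b then
        possible_results ++ [word]
      else possible_results
    else possible_results ++ [word]) []

-- ===== PORT B =====
def onlypfx_alt (word : String) (args : List String) (mode : String) : List String :=
  if mode != "do" then List.replicate args.length word
  else
    let hits0 : Nat := if args.contains "" then 1 else 0
    let st := word.toList.foldl
      (fun (st : List Char × Nat) ch =>
        let p := st.1 ++ [ch]
        (p, st.2 + (if args.contains (String.ofList p) then 1 else 0)))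
      ([], hits0)
    List.replicate st.2 word

-- ===== PRECONDITION & SPEC =====
-- args is a Python Set[str]: Pre_ restricts its List String encoding to the distinct elements
-- a set actually holds; duplicate-element lists cannot arise from A's declared argument type.
def Pre_onlypfx (word : String) (args : List String) (mode : String) : Prop := args.Nodup
instance (word : String) (args : List String) (mode : String) : Decidable (Pre_onlypfx word args mode) := by unfold Pre_onlypfx; infer_instance
def pvWitness_onlypfx : String × List String × String := ("ab", ["a", "b", "x"], "do")

def Spec_onlypfx (word : String) (args : List String) (mode : String) (out : List String) : Prop := out = onlypfx_alt word args mode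
instance (word : String) (args : List String) (mode : String) (out : List String) : Decidable (Spec_onlypfx word args mode out) := by unfold Spec_onlypfx; infer_instance

-- ===== CLAIM (what is proved, stated in full; the proofs are below) =====
def Claim_equal_onlypfx : Prop := ∀ (word : String) (args : List String) (mode : String), Dom_onlypfx word args mode → Pre_onlypfx word args mode → Spec_onlypfx word args mode (onlypfx word args mode)

-- ===== LEMMAS AND PROOFS =====

-- the loop's per-element test in A agrees with startswith
lemma cond_eq (word p : String) :
    (PySem.Str.slice word none (some (PySem.Str.len p)) == p)
      = PySem.Str.startswith word p := by
  have hl : (PySem.Str.slice word none (some (PySem.Str.len p))).toList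
      = word.toList.take p.toList.length := by
    simp [PySem.Str.slice, PySem.Str.len, PySem.List.slice_to_natCast]
  have hs : PySem.Str.startswith word p = PySem.Chars.startswith word.toList p.toList := rfl
  rcases Bool.eq_false_or_eq_true (PySem.Str.startswith word p) with h | h <;> rw [h]
  · rw [hs] at h
    have hpfx : p.toList <+: word.toList := (PySem.Chars.startswith_iff _ _).mp h
    rw [beq_iff_eq]
    apply String.ext
    rw [hl]; exact (List.prefix_iff_eq_take.mp hpfx).symm
  · rw [beq_eq_false_iff_ne]
    intro hc
    have ht : word.toList.take p.toList.length = p.toList := by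
      rw [← hl, hc]
    have hpfx : p.toList <+: word.toList := by
      rw [List.prefix_iff_eq_take]; exact ht.symm
    rw [hs] at h
    rw [(PySem.Chars.startswith_iff word.toList p.toList).mpr hpfx] at h
    exact Bool.true_eq_false.mp h

-- A's loop appends word once per element passing the test
lemma foldl_count (word : String) (cond : String → Bool) (l : List String) (acc : List String) :
    l.foldl (fun r p => if cond p then r ++ [word] else r) acc
      = acc ++ List.replicate (l.countP cond) word := by
  induction l generalizing acc with
  | nil => simp
  | cons x xs ih =>
    by_cases h : cond x = true <;>
      simp [List.foldl_cons, h, ih, List.replicate_succ, List.append_assoc]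

-- A's loop in the other mode appends word once per element
lemma foldl_all (word : String) (l : List String) (acc : List String) :
    l.foldl (fun r (_ : String) => r ++ [word]) acc
      = acc ++ List.replicate l.length word := by
  induction l generalizing acc with
  | nil => simp
  | cons x xs ih => simp [List.foldl_cons, ih, List.replicate_succ, List.append_assoc]

-- recursive description of the hits B's loop adds while consuming the rest of the word
def hitsFrom (args : List String) (acc : List Char) : List Char → Nat
  | [] => 0
  | c :: cs => (if args.contains (String.ofList (acc ++ [c])) then 1 else 0)
      + hitsFrom args (acc ++ [c]) cs

-- B's foldl computes hitsFrom
lemma foldl_hits (args : List String) (l acc : List Char) (h : Nat) :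
    l.foldl (fun (st : List Char × Nat) ch =>
        let p := st.1 ++ [ch]
        (p, st.2 + (if args.contains (String.ofList p) then 1 else 0))) (acc, h)
      = (acc ++ l, h + hitsFrom args acc l) := by
  induction l generalizing acc h with
  | nil => simp [hitsFrom]
  | cons c cs ih =>
    simp only [List.foldl_cons]
    rw [ih]
    simp [hitsFrom]
    omega

-- the hits count as a countP over prefix lengths
lemma hits_range (args : List String) (l acc : List Char) :
    (if args.contains (String.ofList acc) then 1 else 0) + hitsFrom args acc l
      = (List.range (l.length + 1)).countP
          (fun i => args.contains (String.ofList (acc ++ l.take i))) := by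
  induction l generalizing acc with
  | nil => simp [hitsFrom, List.range_succ]
  | cons c cs ih =>
    have hr : List.range (cs.length + 1 + 1)
        = 0 :: (List.range (cs.length + 1)).map Nat.succ := List.range_succ_eq_map
    rw [List.length_cons, hr, List.countP_cons, List.countP_map]
    have hcomp : ((fun i => args.contains (String.ofList (acc ++ (c :: cs).take i))) ∘ Nat.succ)
        = fun i => args.contains (String.ofList ((acc ++ [c]) ++ cs.take i)) := by
      funext i; simp [List.take_succ_cons, List.append_assoc]
    rw [hcomp, ← ih (acc ++ [c])]
    simp [hitsFrom]
    omega

-- main counting fact: over a duplicate-free args, the number of elements that are prefixes of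
-- word equals the number of prefixes of word that are members of args
lemma count_eq (word : String) (args : List String) (hnd : args.Nodup) :
    args.countP (fun p => PySem.Str.startswith word p)
      = (List.range (word.toList.length + 1)).countP
          (fun i => args.contains (String.ofList (word.toList.take i))) := by
  set w := word.toList with hw
  have hpref : ∀ i ∈ List.range (w.length + 1), ∀ j ∈ List.range (w.length + 1),
      String.ofList (w.take i) = String.ofList (w.take j) → i = j := by
    intro i hi j hj hij
    rw [List.mem_range] at hi hj
    have : w.take i = w.take j := by
      have := congrArg String.toList hij
      simpa using this
    have hli := List.length_take_of_le (by omega : i ≤ w.length)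
    have hlj := List.length_take_of_le (by omega : j ≤ w.length)
    have := congrArg List.length this
    omega
  -- rewrite RHS as a countP over the list of prefixes
  rw [show (fun i => args.contains (String.ofList (w.take i)))
      = ((fun s => args.contains s) ∘ (fun i => String.ofList (w.take i))) from rfl,
    ← List.countP_map]
  rw [List.countP_eq_length_filter, List.countP_eq_length_filter]
  have h1 : (args.filter (fun p => PySem.Str.startswith word p)).Nodup := hnd.filter _
  have h2 : (((List.range (w.length + 1)).map (fun i => String.ofList (w.take i))).filter
      (fun s => args.contains s)).Nodup :=
    ((List.nodup_map_iff_inj_on (List.nodup_range)).mpr hpref).filter _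
  rw [← List.toFinset_card_of_nodup h1, ← List.toFinset_card_of_nodup h2]
  congr 1
  ext s
  simp only [List.mem_toFinset, List.mem_filter, List.mem_map, List.mem_range]
  constructor
  · rintro ⟨hmem, hsw⟩
    have hpfx : s.toList <+: w := (PySem.Chars.startswith_iff _ _).mp hsw
    refine ⟨⟨s.toList.length, by have := hpfx.length_le; omega, ?_⟩,
      List.contains_iff_mem.mpr hmem⟩
    rw [← List.prefix_iff_eq_take.mp hpfx]
    exact String.ofList_toList
  · rintro ⟨⟨i, hi, hs⟩, hc⟩
    refine ⟨List.contains_iff_mem.mp hc, ?_⟩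
    apply (PySem.Chars.startswith_iff _ _).mpr
    rw [← hs]
    simpa using List.take_prefix i w

-- ===== VERDICT (by name: the statement is the Claim_ definition above) =====
theorem onlypfx_spec : Claim_equal_onlypfx := by
  intro word args mode _ hnd
  unfold Spec_onlypfx onlypfx onlypfx_alt
  by_cases hm : mode == "do"
  · have hne : (mode != "do") = false := by simp [bne, hm]
    simp only [hm, if_true, hne, Bool.false_eq_true, if_false]
    have h1 := foldl_count word
      (fun p => PySem.Str.slice word none (some (PySem.Str.len p)) == p) args []
    simp only [List.nil_append] at h1
    rw [h1, foldl_hits]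
    have h0 : ("" : String) = String.ofList ([] : List Char) := rfl
    have h2 := hits_range args word.toList []
    simp only [List.nil_append] at h2
    rw [h0, h2]
    congr 1
    rw [List.countP_congr (fun p _ => by rw [cond_eq word p]), count_eq word args hnd]
  · have hne : (mode != "do") = true := by simp [bne, hm]
    simp only [hm, Bool.false_eq_true, if_false, hne, if_true]
    have h2 := foldl_all word args []
    simp only [List.nil_append] at h2
    exact h2
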